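-- pv_equiv track=rewrite | github.com/mjacob1002/PythonPractice | questoinsandanswers.py | freed_prisoners
-- ===== SOURCE A (Python) =====
-- def freed_prisoners(cells: list):
--     count = 0
--     copy = cells
--     for cell in copy:
--         if cell == 1:
--             count += 1
--             for j in range(len(copy)):
--                 if copy[j] == 0:
--                     copy[j] = 1
--                 else:
--                     copy[j] = 0
--     return count
-- ===== SOURCE B (Python) =====
-- def freed_prisoners(cells: list):
--     try:
--         i = cells.index(1)
--     except ValueError:
--         return 0
--     zs = [c == 0 for c in cells[i:]]
--     return 1 + sum(x != y for x, y in zip(zs, zs[1:]))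
-- ===== Notes on version B (the rewrite author's own statement) =====
-- stated objective: alternative
-- what changed: B replaces A's repeated whole-list flipping with a closed form: find the first 1 with list.index, then the answer is 1 plus the number of adjacent zero/nonzero transitions in the remaining suffix (A also mutates its argument in place; B does not).
import Mathlib
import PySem

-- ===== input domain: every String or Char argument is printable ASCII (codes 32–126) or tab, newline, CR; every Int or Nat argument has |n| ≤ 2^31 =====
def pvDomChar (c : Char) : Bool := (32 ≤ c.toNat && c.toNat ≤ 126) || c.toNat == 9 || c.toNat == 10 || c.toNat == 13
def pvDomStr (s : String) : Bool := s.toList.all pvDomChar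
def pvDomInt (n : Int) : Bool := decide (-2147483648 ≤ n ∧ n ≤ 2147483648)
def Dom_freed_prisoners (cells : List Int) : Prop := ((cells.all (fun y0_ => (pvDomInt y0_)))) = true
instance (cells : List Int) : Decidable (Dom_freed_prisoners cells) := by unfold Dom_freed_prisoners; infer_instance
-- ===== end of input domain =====

-- B replaces A's repeated whole-list flipping with a closed form: locate the first 1,
-- then add 1 per adjacent zero/nonzero transition of the remaining suffix (objective:
-- alternative algorithm). Equivalence is about the RETURN value only: Python A mutates
-- its argument list in place, B does not.

-- ===== PORT A =====
-- inner loop 'for j in range(len(copy)): copy[j] = 1 if copy[j]==0 else 0'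
def pvFlipA (copy : List Int) : List Int :=
  copy.map (fun x => if x = 0 then 1 else 0)

-- one step of the outer loop at index i: 'cell = copy[i]; if cell == 1: count += 1; <flip all>'
-- (Python's 'for cell in copy' iterates the LIVE list by index; the list's length never changes,
-- so it reads copy[i] for i = 0 .. len(cells)-1; pyGetD is exact since i is always in range)
def pvStepA (st : List Int × Int) (i : Int) : List Int × Int :=
  if PySem.List.pyGetD st.1 i 0 = 1 then (pvFlipA st.1, st.2 + 1) else st

def freed_prisoners (cells : List Int) : Int :=
  ((PySem.List.pyRange 0 cells.length 1).foldl pvStepA (cells, 0)).2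

-- ===== PORT B =====
def freed_prisoners_alt (cells : List Int) : Int :=
  match PySem.List.index? cells 1 with      -- cells.index(1) / ValueError branch
  | none => 0
  | some i =>
    let zs := (PySem.List.slice cells (some (i : Int)) none).map (fun c => decide (c = 0))
    1 + ((zs.zip zs.tail).map (fun p => if p.1 ≠ p.2 then (1 : Int) else 0)).sum

-- ===== PRECONDITION & SPEC =====
def Spec_freed_prisoners (cells : List Int) (out : Int) : Prop := out = freed_prisoners_alt cells
instance (cells : List Int) (out : Int) : Decidable (Spec_freed_prisoners cells out) := by unfold Spec_freed_prisoners; infer_instance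

-- ===== CLAIM (what is proved, stated in full; the proofs are below) =====
def Claim_equal_freed_prisoners : Prop := ∀ (cells : List Int), Dom_freed_prisoners cells → Spec_freed_prisoners cells (freed_prisoners cells)

-- ===== LEMMAS AND PROOFS =====

-- proof-only intermediate: the one-pass flip-parity loop; A's fold is reduced to it
-- (pvLoop) and it is then summed into B's closed form (pvBridge)
def pvStepB (count : Int) (c : Int) : Int :=
  let one : Bool := if count = 0 then decide (c = 1)
                    else decide (c = 0) == decide (count % 2 = 1)
  if one then count + 1 else count

-- number of adjacent zero/nonzero transitions, threading the previous zero-ness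
def pvTrans : Bool → List Int → Int
  | _, [] => 0
  | p, c :: t => (if decide (c = 0) ≠ p then 1 else 0) + pvTrans (decide (c = 0)) t

theorem pvPairs_sum (x : Bool) (rest : List Int) :
    (((x :: rest.map (fun c => decide (c = 0))).zip (rest.map (fun c => decide (c = 0)))).map
        (fun p => if p.1 ≠ p.2 then (1 : Int) else 0)).sum = pvTrans x rest := by
  induction rest generalizing x with
  | nil => simp [pvTrans]
  | cons c t ih =>
    simp only [List.map_cons, List.zip_cons_cons, List.sum_cons, pvTrans]
    rw [ih (decide (c = 0))]
    congr 1
    by_cases h : x = decide (c = 0) <;> simp [h, eq_comm]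

theorem pvTail_fold (t : List Int) : ∀ (count : Int) (pz : Bool), 1 ≤ count →
    (count % 2 = 1 ↔ pz = false) →
    t.foldl pvStepB count = count + pvTrans pz t := by
  induction t with
  | nil => intro count pz _ _; simp [pvTrans]
  | cons c t ih =>
    intro count pz hc hinv
    have hne : count ≠ 0 := by omega
    have h2 : count % 2 = 0 ∨ count % 2 = 1 := Int.emod_two_eq_zero_or_one count
    simp only [List.foldl_cons, pvStepB, if_neg hne]
    by_cases hz : decide (c = 0) = pz
    · -- same zero-ness as previous cell: no trigger
      have hone : (decide (c = 0) == decide (count % 2 = 1)) = false := by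
        rcases Bool.eq_false_or_eq_true pz with hp | hp <;> simp_all
      rw [hone]
      simp only [Bool.false_eq_true, if_false]
      rw [ih count pz hc hinv, pvTrans, hz]
      simp
    · -- transition: trigger, count increments, parity flips
      have hone : (decide (c = 0) == decide (count % 2 = 1)) = true := by
        rcases Bool.eq_false_or_eq_true pz with hp | hp <;>
          rcases Bool.eq_false_or_eq_true (decide (c = 0)) with hcz | hcz <;>
          simp_all
      rw [hone]
      simp only [if_true]
      have hinv' : (count + 1) % 2 = 1 ↔ (decide (c = 0)) = false := by
        rcases Bool.eq_false_or_eq_true pz with hp | hp <;>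
          rcases Bool.eq_false_or_eq_true (decide (c = 0)) with hcz | hcz <;>
          simp_all <;> omega
      rw [ih (count + 1) (decide (c = 0)) (by omega) hinv', pvTrans]
      have : (decide (c = 0) ≠ pz) := by simp [hz]
      simp [this]
      ring

theorem pvBridge : ∀ (cells : List Int), cells.foldl pvStepB 0 = freed_prisoners_alt cells := by
  intro cells
  induction cells with
  | nil => rfl
  | cons c rest ih =>
    by_cases hc : c = 1
    · subst hc
      have h0 : pvStepB 0 1 = 1 := by simp [pvStepB]
      rw [List.foldl_cons, h0, pvTail_fold rest 1 false le_rfl (by norm_num)]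
      unfold freed_prisoners_alt
      rw [PySem.List.index?_cons_self]
      simp only [Int.natCast_zero]
      rw [PySem.List.slice_zero_start, PySem.List.slice_none_none]
      simp only [List.map_cons, List.tail_cons]
      rw [pvPairs_sum]
      simp
    · have h0 : pvStepB 0 c = 0 := by simp [pvStepB, hc]
      rw [List.foldl_cons, h0, ih]
      unfold freed_prisoners_alt
      rw [PySem.List.index?_cons_of_ne rest hc]
      cases hix : PySem.List.index? rest 1 with
      | none => simp
      | some i =>
        simp only [Option.map_some]
        have hsl : PySem.List.slice (c :: rest) (some ((i + 1 : Nat) : Int)) none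
            = PySem.List.slice rest (some ((i : Nat) : Int)) none := by
          rw [PySem.List.slice_from_natCast, PySem.List.slice_from_natCast]
          simp [List.drop_succ_cons]
        rw [hsl]

-- value of a cell whose original value is c after `count` whole-list flips by A
def pvVal (c : Int) (count : Int) : Int :=
  if count = 0 then c else if (c = 0) ↔ (count % 2 = 1) then 1 else 0

theorem pvFlip_val (c count : Int) (_h : 0 ≤ count) :
    (if pvVal c count = 0 then (1 : Int) else 0) = pvVal c (count + 1) := by
  unfold pvVal
  rcases eq_or_ne count 0 with h0 | h0
  · subst h0; by_cases hc : c = 0 <;> simp [hc]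
  · have h2 : count % 2 = 0 ∨ count % 2 = 1 := Int.emod_two_eq_zero_or_one count
    have h3 : (count + 1) % 2 = (count % 2 + 1) % 2 := by omega
    by_cases hc : c = 0 <;> rcases h2 with h2 | h2 <;>
      simp [h0, hc, h2] <;> omega

theorem pvFlipA_map (xs : List Int) (count : Int) (h : 0 ≤ count) :
    pvFlipA (xs.map (fun c => pvVal c count)) = xs.map (fun c => pvVal c (count + 1)) := by
  unfold pvFlipA
  rw [List.map_map]
  exact List.map_congr_left (fun c _ => pvFlip_val c count h)

theorem pvStepB_iff (c count : Int) (_h : 0 ≤ count) :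
    pvStepB count c = (if pvVal c count = 1 then count + 1 else count) := by
  unfold pvStepB pvVal
  rcases eq_or_ne count 0 with h0 | h0
  · by_cases hc : c = 1 <;> simp [h0, hc]
  · by_cases hiff : (c = 0) ↔ (count % 2 = 1)
    · have : (decide (c = 0) == decide (count % 2 = 1)) = true := by
        by_cases hc : c = 0 <;> simp_all
      simp [h0, hiff]
    · have : (decide (c = 0) == decide (count % 2 = 1)) = false := by
        by_cases hc : c = 0 <;> by_cases hm : count % 2 = 1 <;> simp_all
      simp [h0, hiff]

theorem pvLoop (suf : List Int) : ∀ (s : List Int) (count : Int), 0 ≤ count →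
    suf.length ≤ s.length →
    s.drop (s.length - suf.length) = suf.map (fun c => pvVal c count) →
    ((PySem.List.pyRange ((s.length : Int) - suf.length) s.length 1).foldl pvStepA (s, count)).2
      = suf.foldl pvStepB count := by
  induction suf with
  | nil =>
    intro s count _ _ _
    simp [PySem.List.pyRange_one_eq_nil]
  | cons c t ih =>
    intro s count hc hlen hdrop
    have hk : ((s.length : Int) - (c :: t).length) < s.length := by
      simp only [List.length_cons]; omega
    rw [PySem.List.pyRange_one_cons hk]
    have hknat : ((s.length : Int) - (c :: t).length).toNat = s.length - (c :: t).length := by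
      simp only [List.length_cons]; omega
    -- the cell read at this index is pvVal c count
    have hlt : s.length - (c :: t).length < s.length := by
      simp only [List.length_cons] at hlen ⊢; omega
    have hget : PySem.List.pyGetD s ((s.length : Int) - (c :: t).length) 0 = pvVal c count := by
      rw [PySem.List.pyGetD_eq_getElem s 0 (by simp only [List.length_cons] at hlen ⊢; omega) hk]
      simp only [hknat]
      have h2 : s[s.length - (c :: t).length]? = some (pvVal c count) := by
        have h1 := congrArg (fun l => l[0]?) hdrop
        simpa [List.getElem?_drop] using h1
      obtain ⟨h', he⟩ := List.getElem?_eq_some_iff.mp h2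
      exact he
    simp only [List.foldl_cons, pvStepA, hget]
    rw [pvStepB_iff c count hc]
    have htail : s.drop (s.length - (c :: t).length + 1) = t.map (fun x => pvVal x count) := by
      have := congrArg List.tail hdrop
      simpa [List.tail_drop] using this
    by_cases hone : pvVal c count = 1
    · simp only [hone]
      have hlenF : (pvFlipA s).length = s.length := by simp [pvFlipA]
      have harg : ((s.length : Int) - (c :: t).length) + 1 = ((pvFlipA s).length : Int) - t.length := by
        simp only [hlenF, List.length_cons]; push_cast; omega
      have hdrop' : (pvFlipA s).drop ((pvFlipA s).length - t.length) = t.map (fun x => pvVal x (count + 1)) := by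
        have : (pvFlipA s).drop (s.length - (c :: t).length + 1) = pvFlipA (s.drop (s.length - (c :: t).length + 1)) := by
          simp [pvFlipA, List.map_drop]
        rw [show (pvFlipA s).length - t.length = s.length - (c :: t).length + 1 by
              simp only [hlenF, List.length_cons] at *; omega,
            this, htail, pvFlipA_map t count hc]
      have := ih (pvFlipA s) (count + 1) (by omega)
        (by simp only [hlenF, List.length_cons] at hlen ⊢; omega) hdrop'
      rw [harg]
      rw [show (s.length : Int) = ((pvFlipA s).length : Int) by rw [hlenF]]
      exact this
    · simp only [hone]
      have harg : ((s.length : Int) - (c :: t).length) + 1 = (s.length : Int) - t.length := by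
        simp only [List.length_cons]; push_cast; omega
      have hdrop' : s.drop (s.length - t.length) = t.map (fun x => pvVal x count) := by
        rw [show s.length - t.length = s.length - (c :: t).length + 1 by
              simp only [List.length_cons] at hlen ⊢; omega]
        exact htail
      rw [harg]
      exact ih s count hc (by simp only [List.length_cons] at hlen; omega) hdrop'

-- ===== VERDICT (by name: the statement is the Claim_ definition above) =====
theorem freed_prisoners_spec : Claim_equal_freed_prisoners := by
  intro cells _dom
  unfold Spec_freed_prisoners
  have hmain := pvLoop cells cells 0 le_rfl le_rfl (by simp [pvVal])
  have h1 : freed_prisoners cells = cells.foldl pvStepB 0 := by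
    unfold freed_prisoners; simpa using hmain
  rw [h1, pvBridge]
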